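-- pv_equiv track=rewrite | github.com/0-JackFrost-0/CS-252-Lab-3 | try5.py | msfk_decode
-- ===== SOURCE A (Python) =====
-- def msfk_decode(encoded_message, frequencies):
--     decoded_message = ""
--     message_bits = ""
--     for frequency in encoded_message:
--         if frequency in frequencies:
--             message_bits += '1'
--         else:
--             message_bits += '0'
--         if len(message_bits) == 8:
--             decoded_message += chr(int(message_bits, 2))
--             message_bits = ""
--     return decoded_message
-- ===== SOURCE B (Python) =====
-- def msfk_decode(encoded_message, frequencies):
--     bits = ''.join('1' if f in frequencies else '0' for f in encoded_message)
--     return ''.join(chr(int(bits[i:i + 8], 2)) for i in range(0, len(bits) - 7, 8))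
-- ===== Notes on version B (the rewrite author's own statement) =====
-- stated objective: simpler
-- what changed: B replaces A's single loop carrying an 8-bit buffer and running total with a two-phase decomposition: build the whole bit string in one pass, then decode it in a second stride-8 pass over byte boundaries, dropping any trailing partial byte.
import Mathlib
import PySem

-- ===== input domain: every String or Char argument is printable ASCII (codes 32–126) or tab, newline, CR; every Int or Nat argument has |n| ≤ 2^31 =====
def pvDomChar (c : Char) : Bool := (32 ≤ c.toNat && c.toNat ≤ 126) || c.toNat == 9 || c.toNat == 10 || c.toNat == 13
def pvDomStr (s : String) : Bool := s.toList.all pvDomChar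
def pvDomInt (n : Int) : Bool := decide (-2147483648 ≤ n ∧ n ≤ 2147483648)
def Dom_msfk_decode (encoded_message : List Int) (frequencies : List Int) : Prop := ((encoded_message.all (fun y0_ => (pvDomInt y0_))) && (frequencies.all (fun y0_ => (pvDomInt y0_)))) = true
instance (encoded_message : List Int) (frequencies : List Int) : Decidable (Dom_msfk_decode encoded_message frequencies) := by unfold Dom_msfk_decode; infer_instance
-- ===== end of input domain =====

-- B builds the whole bit string in one pass and then decodes it byte-by-byte in a second
-- pass, instead of A's single loop carrying an 8-bit buffer; objective: simpler two-phase
-- decomposition, same exact return value.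

-- int(s, 2) for a string of '0'/'1' characters (exact on that domain, the only one reached here)
def pvBinVal (l : List Char) : Nat :=
  l.foldl (fun a c => 2 * a + (if c = '1' then 1 else 0)) 0

-- ===== PORT A =====
-- decoded_message/message_bits are carried as List Char (PySem's string representation);
-- the final String.mk only converts the accumulated characters back to a String.
def msfk_decode (encoded_message : List Int) (frequencies : List Int) : String :=
  let st := encoded_message.foldl
    (fun (st : List Char × List Char) frequency =>
      let message_bits := st.2 ++ [if frequency ∈ frequencies then '1' else '0']
      if message_bits.length = 8 then
        (st.1 ++ [Char.ofNat (pvBinVal message_bits)], [])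
      else (st.1, message_bits))
    ([], [])
  String.mk st.1

-- ===== PORT B =====
-- the stride-8 loop `chr(int(bits[i:i+8],2)) for i in range(0, len(bits)-7, 8)`:
-- consume 8 characters per step, stop when fewer than 8 remain (trailing bits dropped)
def pvDecodeBytes (bits : List Char) : List Char :=
  if 8 ≤ bits.length then
    Char.ofNat (pvBinVal (bits.take 8)) :: pvDecodeBytes (bits.drop 8)
  else []
termination_by bits.length
decreasing_by simp; omega

def msfk_decode_alt (encoded_message : List Int) (frequencies : List Int) : String :=
  let bits := encoded_message.map (fun f => if f ∈ frequencies then '1' else '0')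
  String.mk (pvDecodeBytes bits)

-- ===== PRECONDITION & SPEC =====
def Spec_msfk_decode (encoded_message : List Int) (frequencies : List Int) (out : String) : Prop := out = msfk_decode_alt encoded_message frequencies
instance (encoded_message : List Int) (frequencies : List Int) (out : String) : Decidable (Spec_msfk_decode encoded_message frequencies out) := by unfold Spec_msfk_decode; infer_instance

-- ===== CLAIM (what is proved, stated in full; the proofs are below) =====
def Claim_equal_msfk_decode : Prop := ∀ (encoded_message : List Int) (frequencies : List Int), Dom_msfk_decode encoded_message frequencies → Spec_msfk_decode encoded_message frequencies (msfk_decode encoded_message frequencies)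

-- ===== LEMMAS AND PROOFS =====

lemma pvDecodeBytes_small (l : List Char) (h : l.length < 8) : pvDecodeBytes l = [] := by
  rw [pvDecodeBytes]; simp [Nat.not_le.mpr h]

lemma pvDecodeBytes_chunk (l t : List Char) (h : l.length = 8) :
    pvDecodeBytes (l ++ t) = Char.ofNat (pvBinVal l) :: pvDecodeBytes t := by
  rw [pvDecodeBytes]
  have hl : 8 ≤ (l ++ t).length := by simp [h]
  rw [if_pos hl, ← h, List.take_left, List.drop_left]

lemma foldA (fs : List Int) : ∀ (em : List Int) (acc b : List Char), b.length < 8 →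
    (em.foldl
      (fun (st : List Char × List Char) frequency =>
        let message_bits := st.2 ++ [if frequency ∈ fs then '1' else '0']
        if message_bits.length = 8 then
          (st.1 ++ [Char.ofNat (pvBinVal message_bits)], [])
        else (st.1, message_bits))
      (acc, b)).1
    = acc ++ pvDecodeBytes (b ++ em.map (fun f => if f ∈ fs then '1' else '0')) := by
  intro em
  induction em with
  | nil =>
    intro acc b hb
    simp [pvDecodeBytes_small b hb]
  | cons f rest ih =>
    intro acc b hb
    simp only [List.foldl_cons, List.map_cons]
    by_cases h8 : (b ++ [if f ∈ fs then '1' else '0']).length = 8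
    · simp only [h8, reduceIte]
      rw [ih (acc ++ [Char.ofNat (pvBinVal (b ++ [if f ∈ fs then '1' else '0']))]) [] (by norm_num),
          List.append_cons b _ (rest.map _), pvDecodeBytes_chunk _ _ h8]
      simp
    · simp only [h8, if_false]
      rw [ih acc (b ++ [if f ∈ fs then '1' else '0'])
            (by simp at h8 ⊢; omega),
          List.append_cons b _ (rest.map _)]

-- ===== VERDICT (by name: the statement is the Claim_ definition above) =====
theorem msfk_decode_spec : Claim_equal_msfk_decode := by
  intro em fs _
  unfold Spec_msfk_decode msfk_decode msfk_decode_alt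
  exact congrArg String.mk (by simpa using foldA fs em [] [] (by norm_num))
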